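-- pv_equiv track=rewrite | github.com/cavenditti/mercury | mercury/Results.py | calculate_dd
-- ===== SOURCE A (Python) =====
-- def calculate_dd(values):
--     max_value = values[0]
--     max_dd=0
--     i=0
--     for value in values:
--         if value >= max_value:
--             max_value = value
--             i = 0
--             continue
--         i+=1
--         if i > max_dd:
--             max_dd = i
--     return max_dd
-- ===== SOURCE B (Python) =====
-- def calculate_dd(values):
--     # pass 1: prefix maxima
--     m = values[0]
--     running = []
--     for v in values:
--         m = m if m >= v else v
--         running.append(m)
--     # pass 2: longest run where value is below its running max
--     best = cur = 0
--     for v, r in zip(values, running):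
--         if v >= r:
--             cur = 0
--         else:
--             cur += 1
--             if cur > best:
--                 best = cur
--     return best
-- ===== Notes on version B (the rewrite author's own statement) =====
-- stated objective: alternative
-- what changed: single stateful loop carrying (running max, counter, best) replaced by two passes: first build the prefix-maximum list, then scan zip(values, running_max) with a run counter.
import Mathlib
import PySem

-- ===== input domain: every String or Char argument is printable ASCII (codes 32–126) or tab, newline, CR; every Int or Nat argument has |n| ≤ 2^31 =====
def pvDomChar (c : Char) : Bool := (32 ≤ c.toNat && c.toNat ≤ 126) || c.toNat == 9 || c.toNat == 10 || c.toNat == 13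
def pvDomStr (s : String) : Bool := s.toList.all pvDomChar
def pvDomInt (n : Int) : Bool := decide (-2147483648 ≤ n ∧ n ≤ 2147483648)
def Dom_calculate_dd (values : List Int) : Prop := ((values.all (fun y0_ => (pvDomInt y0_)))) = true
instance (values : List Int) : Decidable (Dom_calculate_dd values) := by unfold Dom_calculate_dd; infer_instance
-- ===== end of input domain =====

-- B replaces A's single stateful loop by two passes (build prefix maxima, then scan zip with a run counter); objective: alternative decomposition.


-- ===== PORT A =====
-- A's loop: state (max_value, max_dd, i) folded over values
def calculate_dd (values : List Int) : Int :=
  match values with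
  | [] => 0  -- unreachable: Pre_ requires values ≠ [] (Python raises IndexError on values[0])
  | v0 :: _ =>
    let s := values.foldl
      (fun (st : Int × Int × Int) value =>
        let mv := st.1; let mdd := st.2.1; let i := st.2.2
        if value ≥ mv then (value, mdd, 0)
        else
          let i' := i + 1
          (mv, if i' > mdd then i' else mdd, i'))
      (v0, 0, 0)
    s.2.1

-- ===== PORT B =====
-- pass 1 of Source B: running maxima list built by appending
def calculate_dd_alt (values : List Int) : Int :=
  match values with
  | [] => 0  -- unreachable under Pre_ (B also does values[0])
  | v0 :: _ =>
    let running := (values.foldl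
      (fun (acc : List Int × Int) v =>
        let m := if acc.2 ≥ v then acc.2 else v
        (acc.1 ++ [m], m))
      ([], v0)).1
    let r := (values.zip running).foldl
      (fun (st : Int × Int) p =>
        if p.1 ≥ p.2 then (st.1, 0)
        else
          let c := st.2 + 1
          ((if c > st.1 then c else st.1), c))
      (0, 0)
    r.1

-- ===== PRECONDITION & SPEC =====
-- Pre_ excludes only the empty list, on which Python A raises IndexError at values[0].
def Pre_calculate_dd (values : List Int) : Prop := values ≠ []
instance (values : List Int) : Decidable (Pre_calculate_dd values) := by unfold Pre_calculate_dd; infer_instance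
def pvWitness_calculate_dd : List Int := [3, 1, 2, 5, 4]

def Spec_calculate_dd (values : List Int) (out : Int) : Prop := out = calculate_dd_alt values
instance (values : List Int) (out : Int) : Decidable (Spec_calculate_dd values out) := by unfold Spec_calculate_dd; infer_instance

-- ===== CLAIM (what is proved, stated in full; the proofs are below) =====
def Claim_equal_calculate_dd : Prop := ∀ (values : List Int), Dom_calculate_dd values → Pre_calculate_dd values → Spec_calculate_dd values (calculate_dd values)

-- ===== LEMMAS AND PROOFS =====

-- recursive form of B's first pass
def scanMax : Int → List Int → List Int
  | _, [] => []
  | m, v :: vs => (if m ≥ v then m else v) :: scanMax (if m ≥ v then m else v) vs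

theorem fold_scanMax (vs : List Int) : ∀ (acc : List Int) (m : Int),
    (vs.foldl (fun (acc : List Int × Int) v =>
        let m := if acc.2 ≥ v then acc.2 else v
        (acc.1 ++ [m], m)) (acc, m)).1 = acc ++ scanMax m vs := by
  induction vs with
  | nil => intro acc m; simp [scanMax]
  | cons v vs ih => intro acc m; simp [List.foldl, scanMax, ih]

-- main invariant: B's second pass over zip(vs, scanMax m vs) tracks A's fold
theorem main_inv (vs : List Int) : ∀ (m best cur : Int),
    ((vs.zip (scanMax m vs)).foldl
      (fun (st : Int × Int) p =>
        if p.1 ≥ p.2 then (st.1, 0)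
        else
          let c := st.2 + 1
          ((if c > st.1 then c else st.1), c)) (best, cur)).1
    = (vs.foldl
      (fun (st : Int × Int × Int) value =>
        let mv := st.1; let mdd := st.2.1; let i := st.2.2
        if value ≥ mv then (value, mdd, 0)
        else
          let i' := i + 1
          (mv, if i' > mdd then i' else mdd, i')) (m, best, cur)).2.1 := by
  induction vs with
  | nil => intro m best cur; simp [scanMax]
  | cons v vs ih =>
    intro m best cur
    simp only [scanMax, List.zip_cons_cons, List.foldl]
    by_cases h : m ≥ v
    · by_cases h2 : v ≥ m
      · have hm : m = v := le_antisymm h2 h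
        simp [hm]
        simpa using ih v best 0
      · simp [h, h2]
        simpa using ih m (if cur + 1 > best then cur + 1 else best) (cur + 1)
    · have h2 : v ≥ m := le_of_not_ge h
      simp [h, h2]
      simpa using ih v best 0

-- ===== VERDICT (by name: the statement is the Claim_ definition above) =====
theorem calculate_dd_spec : Claim_equal_calculate_dd := by
  intro values _ hpre
  unfold Spec_calculate_dd calculate_dd calculate_dd_alt
  match values with
  | [] => exact absurd rfl hpre
  | v0 :: vs =>
    simp only
    rw [fold_scanMax (v0 :: vs) [] v0]
    simp only [List.nil_append]
    simpa using (main_inv (v0 :: vs) v0 0 0).symm
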